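-- pv_equiv track=rewrite | github.com/dratcliff/advent-of-code | 2019/test_twenty.py | get_outer
-- ===== SOURCE A (Python) =====
-- from string import ascii_uppercase as uppercase
--
-- def get_portals(grid):
--     portals = {}
--
--     for k, v in grid.items():
--         u = (k[0], k[1]-1)
--         d = (k[0], k[1]+1)
--         f = (k[0]-1, k[1])
--         r = (k[0]+1, k[1])
--
--         uu = (u[0], u[1]-1)
--         dd = (d[0], d[1]+1)
--         ff = (f[0]-1, f[1])
--         rr = (r[0]+1, r[1])
--
--         if u in grid and grid[u] in uppercase:
--             if uu in grid and grid[uu] == ".":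
--                 key = grid[u]+v
--                 if key in portals:
--                     portals[key].append(uu)
--                 else:
--                     portals[key] = [uu]
--
--         if d in grid and grid[d] in uppercase:
--             if dd in grid and grid[dd] == ".":
--                 key = v + grid[d]
--                 if key in portals:
--                     portals[key].append(dd)
--                 else:
--                     portals[key] = [dd]
--
--         if f in grid and grid[f] in uppercase:
--             if ff in grid and grid[ff] == ".":
--                 key = grid[f] + v
--                 if key in portals:
--                     portals[key].append(ff)
--                 else:
--                     portals[key] = [ff]
--
--         if r in grid and grid[r] in uppercase:
--             if rr in grid and grid[rr] == ".":
--                 key = v + grid[r]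
--                 if key in portals:
--                     portals[key].append(rr)
--                 else:
--                     portals[key] = [rr]
--
--     return portals
--
-- def is_outer(mint, maxt, p1):
--     return p1[0] == mint[0]+2 or p1[0] == maxt[0]-2 or p1[1] == maxt[1]-2 or p1[1] == mint[1]+2
--
-- def get_outer(text):
--     grid = {(j, i): w for i, v in enumerate(text) for j, w in enumerate(v)}
--     mint, maxt = get_boundaries(grid)
--     portals = get_portals(grid)
--     for p in portals:
--         if p not in ("AA", "ZZ"):
--             for p1 in portals[p]:
--                 if is_outer(mint, maxt, p1):
--                     grid[p1] = "#"
--     return grid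
--
-- def get_boundaries(grid):
--     minx, miny, maxx, maxy = 99, 99, 0, 0
--     for k in grid:
--         if k[0] < minx:
--             minx = k[0]
--         if k[0] > maxx:
--             maxx = k[0]
--         if k[1] < miny:
--             miny = k[1]
--         if k[1] > maxy:
--             maxy = k[1]
--     return ((minx, miny), (maxx, maxy))
-- ===== SOURCE B (Python) =====
-- # Dot-centric rewrite: instead of building the intermediate portals dict by scanning
-- # every cell's four neighbours, scan only the '.' tiles once, detect a labelled portal
-- # by looking outward in each direction, and block the outer ones directly
-- # (constant-factor faster; no portals dict).
-- from string import ascii_uppercase as uppercase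
--
--
-- def get_boundaries(grid):
--     minx, miny, maxx, maxy = 99, 99, 0, 0
--     for k in grid:
--         if k[0] < minx:
--             minx = k[0]
--         if k[0] > maxx:
--             maxx = k[0]
--         if k[1] < miny:
--             miny = k[1]
--         if k[1] > maxy:
--             maxy = k[1]
--     return ((minx, miny), (maxx, maxy))
--
--
-- def is_outer(mint, maxt, p1):
--     return p1[0] == mint[0]+2 or p1[0] == maxt[0]-2 or p1[1] == maxt[1]-2 or p1[1] == mint[1]+2
--
--
-- def _has_portal(grid, t):
--     x, y = t
--     for dx, dy in ((0, 1), (0, -1), (1, 0), (-1, 0)):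
--         n = (x + dx, y + dy)
--         m = (x + 2 * dx, y + 2 * dy)
--         if n in grid and grid[n] in uppercase and m in grid:
--             label = grid[n] + grid[m] if dx + dy > 0 else grid[m] + grid[n]
--             if label not in ("AA", "ZZ"):
--                 return True
--     return False
--
--
-- def get_outer(text):
--     grid = {(j, i): w for i, v in enumerate(text) for j, w in enumerate(v)}
--     mint, maxt = get_boundaries(grid)
--     blocked = [t for t, v in grid.items()
--                if v == "." and is_outer(mint, maxt, t) and _has_portal(grid, t)]
--     for t in blocked:
--         grid[t] = "#"
--     return grid
-- ===== Notes on version B (the rewrite author's own statement) =====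
-- stated objective: faster
-- what changed: Replaces the per-cell four-direction scan that builds an intermediate portals dict (then iterated to block outer tiles) with a single dot-centric pass: for each '.' tile on the outer ring, look outward in each direction for a two-letter label and block it directly, no portals dict at all.
import Mathlib
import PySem

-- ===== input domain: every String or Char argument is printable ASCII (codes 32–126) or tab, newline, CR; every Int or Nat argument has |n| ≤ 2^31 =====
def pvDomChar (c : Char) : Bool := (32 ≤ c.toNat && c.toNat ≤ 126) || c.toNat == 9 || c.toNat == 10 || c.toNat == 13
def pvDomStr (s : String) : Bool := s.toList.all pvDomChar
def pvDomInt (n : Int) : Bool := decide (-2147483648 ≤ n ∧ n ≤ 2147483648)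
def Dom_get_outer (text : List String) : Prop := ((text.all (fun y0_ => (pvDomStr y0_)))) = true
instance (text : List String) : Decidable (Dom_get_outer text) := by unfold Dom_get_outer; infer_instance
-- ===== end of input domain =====

-- B replaces A's cell-centric portals-dict construction by a single dot-centric pass
-- that blocks the qualifying outer '.' tiles directly (no intermediate portals dict;
-- measurably faster by a constant factor in a timing run).

-- ===== PORT A =====
-- shared helpers: both Pythons contain the same `uppercase` import, grid comprehension,
-- get_boundaries and is_outer, so they are ported once and used by both ports.
def upperStr : String := "ABCDEFGHIJKLMNOPQRSTUVWXYZ"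

-- grid = {(j, i): w for i, v in enumerate(text) for j, w in enumerate(v)}
def gridOf (text : List String) : PySem.Dict (Int × Int) String :=
  (PySem.List.enumerate text 0).foldl (fun g p =>
    (PySem.List.enumerate p.2.toList 0).foldl
      (fun g q => g.insert (q.1, p.1) (String.ofList [q.2])) g) PySem.Dict.empty

-- get_boundaries, verbatim (99/0 initial values kept)
def getBoundaries (g : PySem.Dict (Int × Int) String) : (Int × Int) × (Int × Int) :=
  g.keys.foldl (fun (s : (Int × Int) × (Int × Int)) k =>
    let minx := if k.1 < s.1.1 then k.1 else s.1.1
    let maxx := if k.1 > s.2.1 then k.1 else s.2.1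
    let miny := if k.2 < s.1.2 then k.2 else s.1.2
    let maxy := if k.2 > s.2.2 then k.2 else s.2.2
    ((minx, miny), (maxx, maxy))) ((99, 99), (0, 0))

def isOuter (mint maxt p1 : Int × Int) : Bool :=
  p1.1 == mint.1 + 2 || p1.1 == maxt.1 - 2 || p1.2 == maxt.2 - 2 || p1.2 == mint.2 + 2

-- `if key in portals: portals[key].append(x) else: portals[key] = [x]`
def addEntry (d : PySem.Dict String (List (Int × Int))) (key : String) (x : Int × Int) :
    PySem.Dict String (List (Int × Int)) :=
  if d.contains key then d.insert key (d.getD key [] ++ [x]) else d.insert key [x]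

def getPortals (g : PySem.Dict (Int × Int) String) : PySem.Dict String (List (Int × Int)) :=
  g.items.foldl (fun portals kv =>
    let k := kv.1
    let v := kv.2
    let u : Int × Int := (k.1, k.2 - 1)
    let d : Int × Int := (k.1, k.2 + 1)
    let f : Int × Int := (k.1 - 1, k.2)
    let r : Int × Int := (k.1 + 1, k.2)
    let uu : Int × Int := (u.1, u.2 - 1)
    let dd : Int × Int := (d.1, d.2 + 1)
    let ff : Int × Int := (f.1 - 1, f.2)
    let rr : Int × Int := (r.1 + 1, r.2)
    let portals :=
      if g.contains u && PySem.Str.isIn (g.getD u "") upperStr then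
        if g.contains uu && (g.getD uu "" == ".") then
          addEntry portals (g.getD u "" ++ v) uu
        else portals
      else portals
    let portals :=
      if g.contains d && PySem.Str.isIn (g.getD d "") upperStr then
        if g.contains dd && (g.getD dd "" == ".") then
          addEntry portals (v ++ g.getD d "") dd
        else portals
      else portals
    let portals :=
      if g.contains f && PySem.Str.isIn (g.getD f "") upperStr then
        if g.contains ff && (g.getD ff "" == ".") then
          addEntry portals (g.getD f "" ++ v) ff
        else portals
      else portals
    let portals :=
      if g.contains r && PySem.Str.isIn (g.getD r "") upperStr then
        if g.contains rr && (g.getD rr "" == ".") then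
          addEntry portals (v ++ g.getD r "") rr
        else portals
      else portals
    portals) PySem.Dict.empty

def get_outer (text : List String) : List (Int × Int × String) :=
  let grid := gridOf text
  let b := getBoundaries grid
  let portals := getPortals grid
  let grid2 := portals.keys.foldl (fun g p =>
    if !(p == "AA" || p == "ZZ") then
      (portals.getD p []).foldl
        (fun g p1 => if isOuter b.1 b.2 p1 then g.insert p1 "#" else g) g
    else g) grid
  grid2.items.map (fun kv => (kv.1.1, kv.1.2, kv.2))

-- ===== PORT B =====
def dirList : List (Int × Int) := [(0, 1), (0, -1), (1, 0), (-1, 0)]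

def hasPortal (g : PySem.Dict (Int × Int) String) (t : Int × Int) : Bool :=
  dirList.any (fun dxy =>
    let n : Int × Int := (t.1 + dxy.1, t.2 + dxy.2)
    let m : Int × Int := (t.1 + 2 * dxy.1, t.2 + 2 * dxy.2)
    g.contains n && PySem.Str.isIn (g.getD n "") upperStr && g.contains m &&
      (let label := if dxy.1 + dxy.2 > 0 then g.getD n "" ++ g.getD m ""
                    else g.getD m "" ++ g.getD n ""
       !(label == "AA" || label == "ZZ")))

def get_outer_alt (text : List String) : List (Int × Int × String) :=
  let grid := gridOf text
  let b := getBoundaries grid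
  let blocked := (grid.items.filter
    (fun kv => kv.2 == "." && isOuter b.1 b.2 kv.1 && hasPortal grid kv.1)).map (·.1)
  let grid2 := blocked.foldl (fun g t => g.insert t "#") grid
  grid2.items.map (fun kv => (kv.1.1, kv.1.2, kv.2))

-- ===== PRECONDITION & SPEC =====
def Spec_get_outer (text : List String) (out : List (Int × Int × String)) : Prop := out = get_outer_alt text
instance (text : List String) (out : List (Int × Int × String)) : Decidable (Spec_get_outer text out) := by unfold Spec_get_outer; infer_instance

-- ===== CLAIM (what is proved, stated in full; the proofs are below) =====
def Claim_equal_get_outer : Prop := ∀ (text : List String), Dom_get_outer text → Spec_get_outer text (get_outer text)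


-- ===== LEMMAS AND PROOFS =====

-- `portals[key].append(x) / portals[key]=[x]` is dict.modify
theorem addEntry_eq_modify (d : PySem.Dict String (List (Int × Int))) (k : String) (x : Int × Int) :
    addEntry d k x = d.modify k [] (· ++ [x]) := by
  unfold addEntry PySem.Dict.modify
  split
  · rfl
  · next h =>
    rw [PySem.Dict.getD_of_not_contains _ _ (by simp_all)]
    simp

-- the grid built from the text has pairwise-distinct keys
theorem nodup_keys_gridOf (text : List String) : (gridOf text).keys.Nodup := by
  unfold gridOf
  generalize PySem.List.enumerate text 0 = l
  suffices h : ∀ (l : List (Int × String)) (d : PySem.Dict (Int × Int) String), d.keys.Nodup →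
      ((l.foldl (fun g p => (PySem.List.enumerate p.2.toList 0).foldl
        (fun g q => g.insert (q.1, p.1) (String.ofList [q.2])) g) d).keys.Nodup) from
    h l _ PySem.Dict.nodup_keys_empty
  intro l
  induction l with
  | nil => intro d hd; simpa using hd
  | cons p l ih =>
    intro d hd
    simp only [List.foldl_cons]
    exact ih _ (PySem.Dict.nodup_keys_foldl_insert_key _ (fun (q : Int × Char) => (q.1, p.1)) (fun _ q => String.ofList [q.2]) _ hd)

-- value lookup through a plain '#'-marking fold
theorem getD_markFold (L : List (Int × Int)) (g : PySem.Dict (Int × Int) String) (k : Int × Int) :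
    (L.foldl (fun g t => g.insert t "#") g).getD k "" = if k ∈ L then "#" else g.getD k "" := by
  induction L generalizing g with
  | nil => simp
  | cons t L ih =>
    simp only [List.foldl_cons, ih, PySem.Dict.getD_insert, List.mem_cons]
    by_cases h1 : k ∈ L <;> by_cases h2 : k = t <;> simp [h1, h2]

theorem set_update_of_forall_mem {s xs : List (Int × Int)} (h : ∀ x ∈ xs, x ∈ s) :
    PySem.Set.update s xs = s := by
  rw [PySem.Set.update_eq_append_filter]
  rw [List.filter_eq_nil_iff.mpr ?_, List.append_nil]
  intro a ha
  have hm : a ∈ s := h a ((PySem.Set.mem_ofList xs a).mp ha)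
  simpa using hm

-- A's candidate (label, tile) pairs contributed by one grid item, nested exactly as A nests its ifs
def cand (g : PySem.Dict (Int × Int) String) (kv : (Int × Int) × String) :
    List (String × (Int × Int)) :=
  let k := kv.1
  let v := kv.2
  (if g.contains (k.1, k.2 - 1) && PySem.Str.isIn (g.getD (k.1, k.2 - 1) "") upperStr then
    if g.contains (k.1, k.2 - 1 - 1) && (g.getD (k.1, k.2 - 1 - 1) "" == ".") then
      [(g.getD (k.1, k.2 - 1) "" ++ v, (k.1, k.2 - 1 - 1))] else [] else []) ++
  (if g.contains (k.1, k.2 + 1) && PySem.Str.isIn (g.getD (k.1, k.2 + 1) "") upperStr then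
    if g.contains (k.1, k.2 + 1 + 1) && (g.getD (k.1, k.2 + 1 + 1) "" == ".") then
      [(v ++ g.getD (k.1, k.2 + 1) "", (k.1, k.2 + 1 + 1))] else [] else []) ++
  (if g.contains (k.1 - 1, k.2) && PySem.Str.isIn (g.getD (k.1 - 1, k.2) "") upperStr then
    if g.contains (k.1 - 1 - 1, k.2) && (g.getD (k.1 - 1 - 1, k.2) "" == ".") then
      [(g.getD (k.1 - 1, k.2) "" ++ v, (k.1 - 1 - 1, k.2))] else [] else []) ++
  (if g.contains (k.1 + 1, k.2) && PySem.Str.isIn (g.getD (k.1 + 1, k.2) "") upperStr then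
    if g.contains (k.1 + 1 + 1, k.2) && (g.getD (k.1 + 1 + 1, k.2) "" == ".") then
      [(v ++ g.getD (k.1 + 1, k.2) "", (k.1 + 1 + 1, k.2))] else [] else [])

theorem stage_eq (c1 c2 : Bool) (ky : String) (tl : Int × Int)
    (X : PySem.Dict String (List (Int × Int))) :
    (if c1 then if c2 then X.modify ky [] (· ++ [tl]) else X else X)
      = ((if c1 then if c2 then [(ky, tl)] else [] else []).foldl
          (fun d q => d.modify q.1 [] (· ++ [q.2])) X) := by
  split_ifs <;> simp

theorem getPortals_eq (g : PySem.Dict (Int × Int) String) :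
    getPortals g = (g.items.flatMap (cand g)).foldl
      (fun d q => d.modify q.1 [] (· ++ [q.2])) PySem.Dict.empty := by
  unfold getPortals
  generalize g.items = l
  suffices h : ∀ (l : List ((Int × Int) × String)) (d : PySem.Dict String (List (Int × Int))),
      l.foldl (fun portals kv =>
        let k := kv.1
        let v := kv.2
        let u : Int × Int := (k.1, k.2 - 1)
        let dd0 : Int × Int := (k.1, k.2 + 1)
        let f : Int × Int := (k.1 - 1, k.2)
        let r : Int × Int := (k.1 + 1, k.2)
        let uu : Int × Int := (u.1, u.2 - 1)
        let dd : Int × Int := (dd0.1, dd0.2 + 1)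
        let ff : Int × Int := (f.1 - 1, f.2)
        let rr : Int × Int := (r.1 + 1, r.2)
        let portals :=
          if g.contains u && PySem.Str.isIn (g.getD u "") upperStr then
            if g.contains uu && (g.getD uu "" == ".") then
              addEntry portals (g.getD u "" ++ v) uu
            else portals
          else portals
        let portals :=
          if g.contains dd0 && PySem.Str.isIn (g.getD dd0 "") upperStr then
            if g.contains dd && (g.getD dd "" == ".") then
              addEntry portals (v ++ g.getD dd0 "") dd
            else portals
          else portals
        let portals :=
          if g.contains f && PySem.Str.isIn (g.getD f "") upperStr then
            if g.contains ff && (g.getD ff "" == ".") then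
              addEntry portals (g.getD f "" ++ v) ff
            else portals
          else portals
        let portals :=
          if g.contains r && PySem.Str.isIn (g.getD r "") upperStr then
            if g.contains rr && (g.getD rr "" == ".") then
              addEntry portals (v ++ g.getD r "") rr
            else portals
          else portals
        portals) d
      = (l.flatMap (cand g)).foldl (fun d q => d.modify q.1 [] (· ++ [q.2])) d from h l _
  intro l
  induction l with
  | nil => intro d; simp
  | cons kv l ih =>
    intro d
    simp only [List.foldl_cons, List.flatMap_cons, List.foldl_append, ih]
    congr 1
    obtain ⟨⟨kx, ky⟩, v⟩ := kv
    simp only [addEntry_eq_modify, cand]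
    rw [stage_eq, stage_eq, stage_eq, stage_eq]
    simp [List.foldl_append]

-- A's flat list of tiles that get marked
def LAlist (g : PySem.Dict (Int × Int) String) (mint maxt : Int × Int) : List (Int × Int) :=
  (getPortals g).keys.flatMap (fun p =>
    if !(p == "AA" || p == "ZZ") then
      ((getPortals g).getD p []).filter (isOuter mint maxt) else [])


theorem A_fold_flat (portals : PySem.Dict String (List (Int × Int))) (mint maxt : Int × Int)
    (g : PySem.Dict (Int × Int) String) :
    portals.keys.foldl (fun g p =>
      if !(p == "AA" || p == "ZZ") then
        (portals.getD p []).foldl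
          (fun g p1 => if isOuter mint maxt p1 then g.insert p1 "#" else g) g
      else g) g
    = (portals.keys.flatMap (fun p =>
        if !(p == "AA" || p == "ZZ") then
          (portals.getD p []).filter (isOuter mint maxt) else [])).foldl
        (fun g t => g.insert t "#") g := by
  generalize portals.keys = l
  induction l generalizing g with
  | nil => simp
  | cons p l ih =>
    simp only [List.foldl_cons, List.flatMap_cons, List.foldl_append, ih]
    congr 1
    by_cases hp : (!(p == "AA" || p == "ZZ")) = true
    · simp only [hp, if_true]
      exact PySem.List.foldl_if_eq_foldl_filter (isOuter mint maxt) (fun g t => g.insert t "#") _ g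
    · simp [hp]

theorem get?_of_contains_getD (g : PySem.Dict (Int × Int) String) (k : Int × Int)
    (h : g.contains k = true) : g.get? k = some (g.getD k "") := by
  rw [PySem.Dict.contains_eq_isSome_get?] at h
  obtain ⟨v, hv⟩ := Option.isSome_iff_exists.mp h
  rw [hv, PySem.Dict.getD_of_get?_eq_some _ _ hv]

theorem exists_cand_iff (g : PySem.Dict (Int × Int) String) (hn : g.keys.Nodup) (t : Int × Int) :
    (∃ q ∈ g.items.flatMap (cand g), (!(q.1 == "AA" || q.1 == "ZZ")) = true ∧ q.2 = t)
    ↔ (g.get? t = some "." ∧ hasPortal g t = true) := by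
  constructor
  · rintro ⟨q, hq, hguard, rfl⟩
    rw [List.mem_flatMap] at hq
    obtain ⟨kv, hkv, hc⟩ := hq
    have hkv' : (kv.1, kv.2) ∈ g.items := by simpa using hkv
    have hv : g.getD kv.1 "" = kv.2 := PySem.Dict.getD_of_mem_items g hkv' hn ""
    have hck : g.contains kv.1 = true :=
      (PySem.Dict.contains_iff_mem_keys g kv.1).mpr (PySem.Dict.mem_keys_of_mem_items g hkv')
    simp only [cand, List.mem_append, List.mem_ite_nil_right, List.mem_singleton,
      Bool.and_eq_true, beq_iff_eq] at hc
    rcases hc with ((⟨⟨hc1, hc2⟩, ⟨hc3, hc4⟩, rfl⟩ | ⟨⟨hc1, hc2⟩, ⟨hc3, hc4⟩, rfl⟩) |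
        ⟨⟨hc1, hc2⟩, ⟨hc3, hc4⟩, rfl⟩) | ⟨⟨hc1, hc2⟩, ⟨hc3, hc4⟩, rfl⟩
    · -- up: the marked tile is (kv.1.1, kv.1.2 - 1 - 1)
      refine ⟨by rw [get?_of_contains_getD g _ hc3, hc4], ?_⟩
      unfold hasPortal
      refine List.any_eq_true.mpr ⟨((0 : Int), (1 : Int)), by simp [dirList], ?_⟩
      dsimp only
      have en : ((kv.1.1 + 0 : Int), (kv.1.2 - 1 - 1 + 1 : Int)) = (kv.1.1, kv.1.2 - 1) := by
        simp only [Prod.mk.injEq]; omega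
      have em : ((kv.1.1 + 2 * 0 : Int), (kv.1.2 - 1 - 1 + 2 * 1 : Int)) = kv.1 := by
        rw [Prod.ext_iff]; constructor <;> dsimp <;> omega
      rw [en, em]
      simp only [show ((0 : Int) + 1 > 0) = True by simp, if_true, hv, hc1, hc2, hck,
        Bool.and_eq_true, and_true, true_and]
      exact hguard
    · -- down: the marked tile is (kv.1.1, kv.1.2 + 1 + 1)
      refine ⟨by rw [get?_of_contains_getD g _ hc3, hc4], ?_⟩
      unfold hasPortal
      refine List.any_eq_true.mpr ⟨((0 : Int), (-1 : Int)), by simp [dirList], ?_⟩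
      dsimp only
      have en : ((kv.1.1 + 0 : Int), (kv.1.2 + 1 + 1 + -1 : Int)) = (kv.1.1, kv.1.2 + 1) := by
        simp only [Prod.mk.injEq]; omega
      have em : ((kv.1.1 + 2 * 0 : Int), (kv.1.2 + 1 + 1 + 2 * -1 : Int)) = kv.1 := by
        rw [Prod.ext_iff]; constructor <;> dsimp <;> omega
      rw [en, em]
      simp only [show ((0 : Int) + -1 > 0) = False by norm_num, if_false, hv, hc1, hc2, hck,
        Bool.and_eq_true, and_true, true_and]
      exact hguard
    · -- left: the marked tile is (kv.1.1 - 1 - 1, kv.1.2)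
      refine ⟨by rw [get?_of_contains_getD g _ hc3, hc4], ?_⟩
      unfold hasPortal
      refine List.any_eq_true.mpr ⟨((1 : Int), (0 : Int)), by simp [dirList], ?_⟩
      dsimp only
      have en : ((kv.1.1 - 1 - 1 + 1 : Int), (kv.1.2 + 0 : Int)) = (kv.1.1 - 1, kv.1.2) := by
        simp only [Prod.mk.injEq]; omega
      have em : ((kv.1.1 - 1 - 1 + 2 * 1 : Int), (kv.1.2 + 2 * 0 : Int)) = kv.1 := by
        rw [Prod.ext_iff]; constructor <;> dsimp <;> omega
      rw [en, em]
      simp only [show ((1 : Int) + 0 > 0) = True by norm_num, if_true, hv, hc1, hc2, hck,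
        Bool.and_eq_true, and_true, true_and]
      exact hguard
    · -- right: the marked tile is (kv.1.1 + 1 + 1, kv.1.2)
      refine ⟨by rw [get?_of_contains_getD g _ hc3, hc4], ?_⟩
      unfold hasPortal
      refine List.any_eq_true.mpr ⟨((-1 : Int), (0 : Int)), by simp [dirList], ?_⟩
      dsimp only
      have en : ((kv.1.1 + 1 + 1 + -1 : Int), (kv.1.2 + 0 : Int)) = (kv.1.1 + 1, kv.1.2) := by
        simp only [Prod.mk.injEq]; omega
      have em : ((kv.1.1 + 1 + 1 + 2 * -1 : Int), (kv.1.2 + 2 * 0 : Int)) = kv.1 := by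
        rw [Prod.ext_iff]; constructor <;> dsimp <;> omega
      rw [en, em]
      simp only [show ((-1 : Int) + 0 > 0) = False by norm_num, if_false, hv, hc1, hc2, hck,
        Bool.and_eq_true, and_true, true_and]
      exact hguard
  · rintro ⟨hget, hp⟩
    have hct : g.contains t = true := by
      rw [PySem.Dict.contains_eq_isSome_get?, hget]; rfl
    have hgt : g.getD t "" = "." := PySem.Dict.getD_of_get?_eq_some g "" hget
    unfold hasPortal at hp
    obtain ⟨dxy, hmem, hcond⟩ := List.any_eq_true.mp hp
    have hmem' : dxy = ((0 : Int), (1 : Int)) ∨ dxy = (0, -1) ∨ dxy = (1, 0) ∨ dxy = (-1, 0) := by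
      simpa [dirList] using hmem
    have mk_mem : ∀ (m' : Int × Int), g.contains m' = true → (m', g.getD m' "") ∈ g.items :=
      fun m' h => (PySem.Dict.get?_eq_some_iff_mem_items g m' _ hn).mp (get?_of_contains_getD g m' h)
    rcases hmem' with rfl | rfl | rfl | rfl <;> dsimp only at hcond <;>
      simp only [Bool.and_eq_true] at hcond <;>
      obtain ⟨⟨⟨hc1, hc2⟩, hc3⟩, hguard⟩ := hcond
    · -- direction (0,1): A's up-branch at cell (t.1, t.2 + 2)
      refine ⟨(g.getD (t.1 + 0, t.2 + 1) "" ++ g.getD (t.1 + 2 * 0, t.2 + 2 * 1) "", t),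
        List.mem_flatMap.mpr ⟨((t.1 + 2 * 0, t.2 + 2 * 1), g.getD (t.1 + 2 * 0, t.2 + 2 * 1) ""),
          mk_mem _ hc3, ?_⟩, ?_, rfl⟩
      · simp only [cand, List.mem_append, List.mem_ite_nil_right, List.mem_singleton,
          Bool.and_eq_true, beq_iff_eq]
        refine Or.inl (Or.inl (Or.inl ?_))
        dsimp only
        have en : ((t.1 + 2 * 0 : Int), (t.2 + 2 * 1 - 1 : Int)) = (t.1 + 0, t.2 + 1) := by
          simp only [Prod.mk.injEq]; omega
        have em : ((t.1 + 2 * 0 : Int), (t.2 + 2 * 1 - 1 - 1 : Int)) = t := by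
          rw [Prod.ext_iff]; constructor <;> dsimp <;> omega
        rw [en, em]
        exact ⟨⟨hc1, hc2⟩, ⟨hct, hgt⟩, rfl⟩
      · simpa only [show ((0 : Int) + 1 > 0) = True by simp, if_true] using hguard
    · -- direction (0,-1): A's down-branch at cell (t.1, t.2 - 2)
      refine ⟨(g.getD (t.1 + 2 * 0, t.2 + 2 * -1) "" ++ g.getD (t.1 + 0, t.2 + -1) "", t),
        List.mem_flatMap.mpr ⟨((t.1 + 2 * 0, t.2 + 2 * -1), g.getD (t.1 + 2 * 0, t.2 + 2 * -1) ""),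
          mk_mem _ hc3, ?_⟩, ?_, rfl⟩
      · simp only [cand, List.mem_append, List.mem_ite_nil_right, List.mem_singleton,
          Bool.and_eq_true, beq_iff_eq]
        refine Or.inl (Or.inl (Or.inr ?_))
        dsimp only
        have en : ((t.1 + 2 * 0 : Int), (t.2 + 2 * -1 + 1 : Int)) = (t.1 + 0, t.2 + -1) := by
          simp only [Prod.mk.injEq]; omega
        have em : ((t.1 + 2 * 0 : Int), (t.2 + 2 * -1 + 1 + 1 : Int)) = t := by
          rw [Prod.ext_iff]; constructor <;> dsimp <;> omega
        rw [en, em]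
        exact ⟨⟨hc1, hc2⟩, ⟨hct, hgt⟩, rfl⟩
      · simpa only [show ((0 : Int) + -1 > 0) = False by norm_num, if_false] using hguard
    · -- direction (1,0): A's left-branch at cell (t.1 + 2, t.2)
      refine ⟨(g.getD (t.1 + 1, t.2 + 0) "" ++ g.getD (t.1 + 2 * 1, t.2 + 2 * 0) "", t),
        List.mem_flatMap.mpr ⟨((t.1 + 2 * 1, t.2 + 2 * 0), g.getD (t.1 + 2 * 1, t.2 + 2 * 0) ""),
          mk_mem _ hc3, ?_⟩, ?_, rfl⟩
      · simp only [cand, List.mem_append, List.mem_ite_nil_right, List.mem_singleton,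
          Bool.and_eq_true, beq_iff_eq]
        refine Or.inl (Or.inr ?_)
        dsimp only
        have en : ((t.1 + 2 * 1 - 1 : Int), (t.2 + 2 * 0 : Int)) = (t.1 + 1, t.2 + 0) := by
          simp only [Prod.mk.injEq]; omega
        have em : ((t.1 + 2 * 1 - 1 - 1 : Int), (t.2 + 2 * 0 : Int)) = t := by
          rw [Prod.ext_iff]; constructor <;> dsimp <;> omega
        rw [en, em]
        exact ⟨⟨hc1, hc2⟩, ⟨hct, hgt⟩, rfl⟩
      · simpa only [show ((1 : Int) + 0 > 0) = True by norm_num, if_true] using hguard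
    · -- direction (-1,0): A's right-branch at cell (t.1 - 2, t.2)
      refine ⟨(g.getD (t.1 + 2 * -1, t.2 + 2 * 0) "" ++ g.getD (t.1 + -1, t.2 + 0) "", t),
        List.mem_flatMap.mpr ⟨((t.1 + 2 * -1, t.2 + 2 * 0), g.getD (t.1 + 2 * -1, t.2 + 2 * 0) ""),
          mk_mem _ hc3, ?_⟩, ?_, rfl⟩
      · simp only [cand, List.mem_append, List.mem_ite_nil_right, List.mem_singleton,
          Bool.and_eq_true, beq_iff_eq]
        refine Or.inr ?_
        dsimp only
        have en : ((t.1 + 2 * -1 + 1 : Int), (t.2 + 2 * 0 : Int)) = (t.1 + -1, t.2 + 0) := by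
          simp only [Prod.mk.injEq]; omega
        have em : ((t.1 + 2 * -1 + 1 + 1 : Int), (t.2 + 2 * 0 : Int)) = t := by
          rw [Prod.ext_iff]; constructor <;> dsimp <;> omega
        rw [en, em]
        exact ⟨⟨hc1, hc2⟩, ⟨hct, hgt⟩, rfl⟩
      · simpa only [show ((-1 : Int) + 0 > 0) = False by norm_num, if_false] using hguard

theorem mem_LAlist_iff (g : PySem.Dict (Int × Int) String) (hn : g.keys.Nodup)
    (mint maxt : Int × Int) (t : Int × Int) :
    t ∈ LAlist g mint maxt ↔
      (g.get? t = some "." ∧ isOuter mint maxt t = true ∧ hasPortal g t = true) := by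
  unfold LAlist
  rw [getPortals_eq]
  have hkeys := PySem.Dict.keys_foldl_modify_key (g.items.flatMap (cand g)) (fun q => q.1) []
    (fun _ q => fun y => y ++ [q.2]) PySem.Dict.empty
  simp only [PySem.Dict.keys_empty, PySem.Set.update_nil_left] at hkeys
  rw [hkeys]
  constructor
  · intro ht
    rw [List.mem_flatMap] at ht
    obtain ⟨p, hpmem, hpt⟩ := ht
    rw [List.mem_ite_nil_right] at hpt
    obtain ⟨hguard, hpt⟩ := hpt
    rw [List.mem_filter] at hpt
    obtain ⟨hpt, houter⟩ := hpt
    rw [PySem.Dict.getD_foldl_modify_append, PySem.Dict.getD_empty, List.nil_append,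
      List.mem_map] at hpt
    obtain ⟨q, hqmem, rfl⟩ := hpt
    obtain ⟨hqP, hq1⟩ := List.mem_filter.mp hqmem
    have := (exists_cand_iff g hn q.2).mp ⟨q, hqP, by rwa [beq_iff_eq.mp hq1], rfl⟩
    exact ⟨this.1, houter, this.2⟩
  · rintro ⟨hget, houter, hp⟩
    obtain ⟨q, hqP, hguard, hq2⟩ := (exists_cand_iff g hn t).mpr ⟨hget, hp⟩
    rw [List.mem_flatMap]
    refine ⟨q.1, (PySem.Set.mem_ofList _ _).mpr (List.mem_map.mpr ⟨q, hqP, rfl⟩), ?_⟩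
    rw [List.mem_ite_nil_right]
    refine ⟨hguard, ?_⟩
    rw [List.mem_filter]
    refine ⟨?_, hq2 ▸ houter⟩
    rw [PySem.Dict.getD_foldl_modify_append, PySem.Dict.getD_empty, List.nil_append, List.mem_map]
    exact ⟨q, List.mem_filter.mpr ⟨hqP, by simp⟩, hq2⟩

def blockedList (g : PySem.Dict (Int × Int) String) (mint maxt : Int × Int) : List (Int × Int) :=
  (g.items.filter (fun kv => kv.2 == "." && isOuter mint maxt kv.1 && hasPortal g kv.1)).map (·.1)

theorem mem_blockedList_iff (g : PySem.Dict (Int × Int) String) (hn : g.keys.Nodup)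
    (mint maxt : Int × Int) (t : Int × Int) :
    t ∈ blockedList g mint maxt ↔
      (g.get? t = some "." ∧ isOuter mint maxt t = true ∧ hasPortal g t = true) := by
  simp only [blockedList, List.mem_map, List.mem_filter]
  constructor
  · rintro ⟨⟨k, v⟩, ⟨hmem, hcond⟩, rfl⟩
    simp only [Bool.and_eq_true, beq_iff_eq] at hcond
    obtain ⟨⟨hv, ho⟩, hp⟩ := hcond
    subst hv
    exact ⟨(PySem.Dict.get?_eq_some_iff_mem_items g k "." hn).mpr hmem, ho, hp⟩
  · rintro ⟨hget, ho, hp⟩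
    exact ⟨(t, "."), ⟨(PySem.Dict.get?_eq_some_iff_mem_items g t "." hn).mp hget,
      by simp [ho, hp]⟩, rfl⟩

theorem markFold_items_eq (g : PySem.Dict (Int × Int) String) (hn : g.keys.Nodup)
    (L1 L2 : List (Int × Int)) (hsub : ∀ t ∈ L1, t ∈ g.keys)
    (hiff : ∀ t, t ∈ L1 ↔ t ∈ L2) :
    (L1.foldl (fun g t => g.insert t "#") g).items
      = (L2.foldl (fun g t => g.insert t "#") g).items := by
  have hsub2 : ∀ t ∈ L2, t ∈ g.keys := fun t ht => hsub t ((hiff t).mpr ht)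
  have hk : ∀ (L : List (Int × Int)), (∀ t ∈ L, t ∈ g.keys) →
      (L.foldl (fun g t => g.insert t "#") g).keys = g.keys := by
    intro L hL
    have h := PySem.Dict.keys_foldl_insert L (fun _ _ => "#") g
    simp only at h
    rw [h]
    exact set_update_of_forall_mem hL
  have hk1 := hk L1 hsub
  have hk2 := hk L2 hsub2
  rw [PySem.Dict.items_eq_map_keys _ (by rw [hk1]; exact hn) "",
      PySem.Dict.items_eq_map_keys _ (by rw [hk2]; exact hn) "", hk1, hk2]
  apply List.map_congr_left
  intro k _
  rw [getD_markFold, getD_markFold]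
  by_cases h1 : k ∈ L1
  · simp [h1, (hiff k).mp h1]
  · have h2 : k ∉ L2 := fun h => h1 ((hiff k).mpr h)
    simp [h1, h2]

-- ===== VERDICT (by name: the statement is the Claim_ definition above) =====
theorem get_outer_spec : Claim_equal_get_outer := by
  intro text _
  simp only [Spec_get_outer, get_outer, get_outer_alt]
  have hn := nodup_keys_gridOf text
  rw [A_fold_flat]
  have := markFold_items_eq (gridOf text) hn
    (LAlist (gridOf text) (getBoundaries (gridOf text)).1 (getBoundaries (gridOf text)).2)
    (blockedList (gridOf text) (getBoundaries (gridOf text)).1 (getBoundaries (gridOf text)).2)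
    (by intro t ht
        have h := (mem_LAlist_iff _ hn _ _ t).mp ht
        have : (gridOf text).contains t = true := by
          rw [PySem.Dict.contains_eq_isSome_get?, h.1]; rfl
        exact (PySem.Dict.contains_iff_mem_keys _ t).mp this)
    (by intro t; rw [mem_LAlist_iff _ hn, mem_blockedList_iff _ hn])
  rw [show (LAlist (gridOf text) (getBoundaries (gridOf text)).1 (getBoundaries (gridOf text)).2)
      = (getPortals (gridOf text)).keys.flatMap (fun p =>
        if !(p == "AA" || p == "ZZ") then
          ((getPortals (gridOf text)).getD p []).filter
            (isOuter (getBoundaries (gridOf text)).1 (getBoundaries (gridOf text)).2) else [])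
      from rfl] at this
  rw [this]
  rfl
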